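-- pv_equiv track=rewrite | github.com/hymaia/data-inges-exos | 01-clean-code/main.py | heights_lock
-- ===== SOURCE A (Python) =====
-- def heights_lock(block):
--     w = len(block[0])
--     h = len(block)
--     res = []
--     for c in range(w):
--         k = 0
--         for r in range(h):
--             if block[r][c] == "#":
--                 k += 1
--             else:
--                 break
--         res.append(max(0, k - 1))
--     return res, h
-- ===== SOURCE B (Python) =====
-- def heights_lock(block):
--     w = len(block[0])
--     k = [0] * w
--     alive = [True] * w
--     for row in block:
--         for c in range(w):
--             if alive[c] and row[c] == "#":
--                 k[c] += 1
--             else: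
--                 alive[c] = False
--     return [max(0, x - 1) for x in k], len(block)
-- ===== Notes on version B (the rewrite author's own statement) =====
-- stated objective: alternative
-- what changed: Replaces A's column-major nested scans (per column, scan rows with a break) by a single row-major pass that folds one per-column (count, alive) state vector over the rows, so each row is visited once and the break becomes a sticky alive flag.
import Mathlib
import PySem

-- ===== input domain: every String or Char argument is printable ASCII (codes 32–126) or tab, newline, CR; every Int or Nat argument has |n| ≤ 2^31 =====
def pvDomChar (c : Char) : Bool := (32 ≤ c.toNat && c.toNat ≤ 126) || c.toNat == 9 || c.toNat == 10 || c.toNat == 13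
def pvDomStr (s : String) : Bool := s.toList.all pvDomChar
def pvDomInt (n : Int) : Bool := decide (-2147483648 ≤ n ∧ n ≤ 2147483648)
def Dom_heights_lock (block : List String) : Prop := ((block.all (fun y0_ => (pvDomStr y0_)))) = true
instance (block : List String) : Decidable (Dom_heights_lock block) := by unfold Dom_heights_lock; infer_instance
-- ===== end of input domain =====

-- B replaces A's column-major nested scans with a single row-major pass that folds a per-column
-- (count, alive) state over the rows; alternative traversal order, same cost.


-- ===== PORT A =====
-- inner 'for r in range(h): if block[r][c] == "#": k += 1 else: break'
-- (block[r][c] = Str.pyGet?; 'none' is Python's IndexError, excluded by Pre_)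
def pvGoA (c : Int) : List String → Int → Int
  | [], k => k
  | row :: rest, k =>
    match PySem.Str.pyGet? row c with
    | some ch => if ch == '#' then pvGoA c rest (k + 1) else k
    | none => k

def heights_lock (block : List String) : List Int × Int :=
  let w : Int := PySem.Str.len (block.headD "")   -- len(block[0]); empty block is IndexError, excluded by Pre_
  let h : Int := PySem.List.len block
  let res := (PySem.List.pyRange 0 w 1).map (fun c => max 0 (pvGoA c block 0 - 1))
  (res, h)

-- ===== PORT B =====
-- one row's inner 'for c in range(w)' over the per-column (k, alive) state, positions = columns;
-- row[c] = Str.pyGet?, 'none' is Python's IndexError, excluded by Pre_ (placeholder ' ' there)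
def pvStepB (row : String) (c : Int) : List (Int × Bool) → List (Int × Bool)
  | [] => []
  | (k, alive) :: rest =>
    (if alive && ((PySem.Str.pyGet? row c).getD ' ' == '#') then (k + 1, alive) else (k, false))
      :: pvStepB row (c + 1) rest

def heights_lock_alt (block : List String) : List Int × Int :=
  let w : Nat := (block.headD "").toList.length
  let st := block.foldl (fun st row => pvStepB row 0 st) (List.replicate w ((0 : Int), true))
  (st.map (fun p => max 0 (p.1 - 1)), PySem.List.len block)

-- ===== PRECONDITION & SPEC =====
-- Pre_ excludes exactly the inputs on which A raises IndexError: the empty block (len(block[0])),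
-- and ragged blocks where some row is reached at a column whose leading-'#' run is still intact
-- but the row is too short there (B raises on exactly the same inputs).
def Pre_heights_lock (block : List String) : Prop :=
  block ≠ [] ∧
  ∀ r < block.length, ∀ c < (block.headD "").toList.length,
    (∀ s ∈ block.take r, s.toList.getD c ' ' = '#') →
    c < (block.getD r "").toList.length
instance (block : List String) : Decidable (Pre_heights_lock block) := by
  unfold Pre_heights_lock; infer_instance
def pvWitness_heights_lock : List String := ["#.#", "#x#", ".y#"]

def Spec_heights_lock (block : List String) (out : List Int × Int) : Prop := out = heights_lock_alt block
instance (block : List String) (out : List Int × Int) : Decidable (Spec_heights_lock block out) := by unfold Spec_heights_lock; infer_instance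

-- ===== CLAIM (what is proved, stated in full; the proofs are below) =====
def Claim_equal_heights_lock : Prop := ∀ (block : List String), Dom_heights_lock block → Pre_heights_lock block → Spec_heights_lock block (heights_lock block)

-- ===== LEMMAS AND PROOFS =====

-- the per-column step B applies at column c of one row
def pvColStep (row : String) (c : Int) (p : Int × Bool) : Int × Bool :=
  if p.2 && ((PySem.Str.pyGet? row c).getD ' ' == '#') then (p.1 + 1, p.2) else (p.1, false)

lemma pvStepB_cons (row : String) (c : Int) (p : Int × Bool) (st : List (Int × Bool)) :
    pvStepB row c (p :: st) = pvColStep row c p :: pvStepB row (c + 1) st := by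
  cases p; simp [pvStepB, pvColStep]

lemma pvStepB_nil (row : String) (c : Int) : pvStepB row c [] = [] := rfl

-- the row-fold splits column-wise: head column evolves by pvColStep at c, tail at c+1
lemma pvFold_cons (rows : List String) (c : Int) (p : Int × Bool) (st : List (Int × Bool)) :
    rows.foldl (fun s r => pvStepB r c s) (p :: st)
      = (rows.foldl (fun q r => pvColStep r c q) p)
        :: rows.foldl (fun s r => pvStepB r (c + 1) s) st := by
  induction rows generalizing p st with
  | nil => rfl
  | cons row rest ih => simp [List.foldl_cons, pvStepB_cons, ih]

lemma pvFold_nil (rows : List String) (c : Int) :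
    rows.foldl (fun s r => pvStepB r c s) [] = [] := by
  induction rows with
  | nil => rfl
  | cons row rest ih => simpa [pvStepB_nil] using ih

lemma pvFold_replicate (rows : List String) (c : Int) (n : Nat) :
    rows.foldl (fun s r => pvStepB r c s) (List.replicate n ((0 : Int), true))
      = (List.range n).map
          (fun (i : Nat) => rows.foldl (fun q r => pvColStep r (c + (i : Int)) q) ((0 : Int), true)) := by
  induction n generalizing c with
  | zero => simp [pvFold_nil]
  | succ m ih =>
    rw [List.replicate_succ, pvFold_cons, ih, List.range_succ_eq_map]
    simp only [List.map_cons, List.map_map, Nat.cast_zero, add_zero]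
    refine congrArg₂ _ rfl ?_
    refine List.map_congr_left (fun i _ => ?_)
    have h : c + 1 + (i : Int) = c + ((i + 1 : Nat) : Int) := by push_cast; ring
    exact congrArg (fun z => rows.foldl (fun q r => pvColStep r z q) ((0 : Int), true)) h

-- a dead column never changes again
lemma pvColFold_false (rows : List String) (c : Int) (k : Int) :
    rows.foldl (fun q r => pvColStep r c q) (k, false) = (k, false) := by
  induction rows with
  | nil => rfl
  | cons row rest ih => simpa [pvColStep] using ih

-- the live column-fold counts exactly what A's break-loop counts
lemma pvColFold_true (rows : List String) (c : Int) (k : Int) :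
    (rows.foldl (fun q r => pvColStep r c q) (k, true)).1 = pvGoA c rows k := by
  induction rows generalizing k with
  | nil => rfl
  | cons row rest ih =>
    rw [List.foldl_cons]
    cases h : PySem.List.pyGet? row.toList c with
    | none =>
      have hs : pvColStep row c (k, true) = (k, false) := by simp [pvColStep, PySem.Str.pyGet?, h]
      rw [hs, pvColFold_false]
      simp [pvGoA, PySem.Str.pyGet?, h]
    | some ch =>
      by_cases hc : ch = '#'
      · subst hc
        have hs : pvColStep row c (k, true) = (k + 1, true) := by
          simp [pvColStep, PySem.Str.pyGet?, h]
        rw [hs, ih]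
        simp [pvGoA, PySem.Str.pyGet?, h]
      · have hs : pvColStep row c (k, true) = (k, false) := by
          simp [pvColStep, PySem.Str.pyGet?, h, hc]
        rw [hs, pvColFold_false]
        simp [pvGoA, PySem.Str.pyGet?, h, hc]

lemma pvStrLen_toList (s : String) : PySem.Str.len s = (s.toList.length : Int) := rfl

-- ===== VERDICT (by name: the statement is the Claim_ definition above) =====
theorem heights_lock_spec : Claim_equal_heights_lock := by
  intro block _ _
  unfold Spec_heights_lock heights_lock heights_lock_alt
  dsimp only
  refine Prod.ext ?_ rfl
  rw [pvFold_replicate, pvStrLen_toList, PySem.List.pyRange_one]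
  simp only [List.map_map, Int.sub_zero, Int.toNat_natCast]
  refine List.map_congr_left (fun i _ => ?_)
  simp only [Function.comp_apply]
  rw [pvColFold_true]
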